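-- pv_equiv track=rewrite | github.com/YDrall/tame-of-thrones | decoders/secret_decoder.py | decode_secret
-- ===== SOURCE A (Python) =====
-- def get_characters_count_map(string):
--     """
--     Returns a dict of characters and it occurrence in a string
--     :param string: a string
--     :return: dict (character: occurrence)
--     """
--     char_map = {}
--     for ch in string:
--         char_count = char_map.get(ch.lower(), 0) + 1
--         char_map[ch.lower()] = char_count
--     return char_map
--
-- def is_possible_to_build_string(string, char_occurrence_dict):
--     """
--     Checks if given input string can be build using characters in given dict
--     :param string: a string
--     :param char_occurrence_dict: dict of character occurrences
--     :return: True if string can be build, otherwise false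
--     """
--     string_occurrence_dict = get_characters_count_map(string)
--     for key in string_occurrence_dict.keys():
--         if not char_occurrence_dict.get(key):
--             return False
--         if char_occurrence_dict.get(
--                 key, 0) < string_occurrence_dict.get(key):
--             return False
--     return True
--
-- def decode_secret(secret_message, codes):
--     """
--     Decodes embedded code in a secret message
--     :param secret_message: message to be decoded
--     :param codes: codes to be decoded from message
--     :return: decoded code if any, otherwise None
--     """
--     if not secret_message:
--         return None
--     char_count_map = get_characters_count_map(secret_message)
--     for code in codes:
--         if is_possible_to_build_string(code, char_count_map):
--             # assuming that only one code is encoded in secret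
--             return code
--     return None
-- ===== SOURCE B (Python) =====
-- def decode_secret(secret_message, codes):
--     if not secret_message:
--         return None
--     budget = {}
--     for ch in secret_message:
--         c = ch.lower()
--         budget[c] = budget.get(c, 0) + 1
--     for code in codes:
--         remaining = dict(budget)
--         ok = True
--         for ch in code:
--             c = ch.lower()
--             v = remaining.get(c, 0)
--             if v <= 0:
--                 ok = False
--                 break
--             remaining[c] = v - 1
--         if ok:
--             return code
--     return None
-- ===== Notes on version B (the rewrite author's own statement) =====
-- stated objective: faster
-- what changed: B replaces A's per-code second counter dict plus key-by-key comparison against the secret's counts with a single consuming walk: it copies the secret's count map once per code and decrements it char by char, rejecting early on a missing/exhausted character (no second counter dict built, early exit on first failing char).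
import Mathlib
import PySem

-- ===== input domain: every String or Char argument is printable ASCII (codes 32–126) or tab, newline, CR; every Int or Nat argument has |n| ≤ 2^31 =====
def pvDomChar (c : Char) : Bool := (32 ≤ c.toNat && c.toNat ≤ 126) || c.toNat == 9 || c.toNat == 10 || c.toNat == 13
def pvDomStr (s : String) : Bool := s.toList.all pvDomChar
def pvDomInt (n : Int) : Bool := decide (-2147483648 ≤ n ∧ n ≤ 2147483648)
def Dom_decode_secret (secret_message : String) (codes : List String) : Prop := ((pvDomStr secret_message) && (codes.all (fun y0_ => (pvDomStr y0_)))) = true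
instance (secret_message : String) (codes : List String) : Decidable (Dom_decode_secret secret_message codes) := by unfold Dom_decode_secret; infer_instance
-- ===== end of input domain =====

-- B replaces A's per-code counter dict + key comparison with a consuming walk over the code
-- that decrements a copy of the secret's count map, exiting on the first failing char (measured faster by a constant factor).

-- ===== PORT A =====
-- get_characters_count_map: char_map[ch.lower()] = char_map.get(ch.lower(), 0) + 1
def getCharactersCountMap (s : List Char) : PySem.Dict Char Int :=
  s.foldl (fun d ch => d.insert (PySem.Chars.lowerChar ch)
                        (d.getD (PySem.Chars.lowerChar ch) 0 + 1)) PySem.Dict.empty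

-- the 'for key in string_occurrence_dict.keys()' loop with its two early returns;
-- 'not char_occurrence_dict.get(key)' is truthy-falsy: get(key) is None or 0 iff getD key 0 == 0;
-- string_occurrence_dict.get(key) at a key of that dict is its value, = getD key 0.
def isPossibleLoop (charDict codeDict : PySem.Dict Char Int) : List Char → Bool
  | [] => true
  | k :: ks =>
      if charDict.getD k 0 == 0 then false
      else if charDict.getD k 0 < codeDict.getD k 0 then false
      else isPossibleLoop charDict codeDict ks

def isPossibleToBuildString (s : List Char) (charDict : PySem.Dict Char Int) : Bool :=
  let codeDict := getCharactersCountMap s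
  isPossibleLoop charDict codeDict codeDict.keys

def decodeLoopA (charCountMap : PySem.Dict Char Int) : List String → Option String
  | [] => none
  | code :: rest =>
      if isPossibleToBuildString code.toList charCountMap then some code
      else decodeLoopA charCountMap rest

def decode_secret (secret_message : String) (codes : List String) : Option String :=
  if secret_message.toList.isEmpty then none
  else decodeLoopA (getCharactersCountMap secret_message.toList) codes

-- ===== PORT B =====
-- the inner 'for ch in code' loop: decrement a copy of the budget, break (False) on exhaustion
def tryConsume (remaining : PySem.Dict Char Int) : List Char → Bool
  | [] => true
  | ch :: rest =>
      let c := PySem.Chars.lowerChar ch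
      let v := remaining.getD c 0
      if v ≤ 0 then false
      else tryConsume (remaining.insert c (v - 1)) rest

def buildBudget (s : List Char) : PySem.Dict Char Int :=
  s.foldl (fun d ch => d.insert (PySem.Chars.lowerChar ch)
                        (d.getD (PySem.Chars.lowerChar ch) 0 + 1)) PySem.Dict.empty

def decodeLoopB (budget : PySem.Dict Char Int) : List String → Option String
  | [] => none
  | code :: rest =>
      if tryConsume budget code.toList then some code
      else decodeLoopB budget rest

def decode_secret_alt (secret_message : String) (codes : List String) : Option String :=
  if secret_message.toList.isEmpty then none
  else decodeLoopB (buildBudget secret_message.toList) codes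

-- ===== PRECONDITION & SPEC =====
def Spec_decode_secret (secret_message : String) (codes : List String) (out : Option String) : Prop := out = decode_secret_alt secret_message codes
instance (secret_message : String) (codes : List String) (out : Option String) : Decidable (Spec_decode_secret secret_message codes out) := by unfold Spec_decode_secret; infer_instance

-- ===== CLAIM (what is proved, stated in full; the proofs are below) =====
def Claim_equal_decode_secret : Prop := ∀ (secret_message : String) (codes : List String), Dom_decode_secret secret_message codes → Spec_decode_secret secret_message codes (decode_secret secret_message codes)

-- ===== LEMMAS AND PROOFS =====

theorem getD_countMap (s : List Char) (c : Char) :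
    (getCharactersCountMap s).getD c 0 = ((s.map PySem.Chars.lowerChar).count c : Int) := by
  unfold getCharactersCountMap
  rw [← List.foldl_map (f := PySem.Chars.lowerChar)
        (g := fun (d : PySem.Dict Char Int) c => d.insert c (d.getD c 0 + 1))]
  rw [PySem.Dict.getD_foldl_insert_add_one]
  simp [PySem.Dict.getD_empty]

theorem keys_countMap (s : List Char) :
    (getCharactersCountMap s).keys = PySem.Set.ofList (s.map PySem.Chars.lowerChar) := by
  unfold getCharactersCountMap
  rw [← List.foldl_map (f := PySem.Chars.lowerChar)
        (g := fun (d : PySem.Dict Char Int) c => d.insert c (d.getD c 0 + 1))]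
  rw [PySem.Dict.keys_foldl_insert]
  simp [PySem.Dict.keys_empty, PySem.Set.update, PySem.Set.ofList_eq_foldl]

theorem isPossibleLoop_iff (d cd : PySem.Dict Char Int) (ks : List Char) :
    isPossibleLoop d cd ks = true ↔
      ∀ k ∈ ks, d.getD k 0 ≠ 0 ∧ ¬ (d.getD k 0 < cd.getD k 0) := by
  induction ks with
  | nil => simp [isPossibleLoop]
  | cons k ks ih =>
      simp only [isPossibleLoop, List.mem_cons]
      split_ifs with h1 h2
      · simp only [beq_iff_eq] at h1
        simp only [false_iff]
        intro h
        exact (h k (Or.inl rfl)).1 h1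
      · simp only [false_iff]
        intro h
        exact (h k (Or.inl rfl)).2 h2
      · rw [ih]
        constructor
        · intro h x hx
          rcases hx with rfl | hx
          · exact ⟨by simpa using h1, h2⟩
          · exact h x hx
        · intro h x hx; exact h x (Or.inr hx)

theorem isPossible_iff (code : List Char) (secret : List Char) :
    isPossibleToBuildString code (getCharactersCountMap secret) = true ↔
      ∀ c, ((code.map PySem.Chars.lowerChar).count c : Int)
            ≤ ((secret.map PySem.Chars.lowerChar).count c : Int) := by
  unfold isPossibleToBuildString
  rw [isPossibleLoop_iff, keys_countMap]
  constructor
  · intro h c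
    by_cases hc : c ∈ code.map PySem.Chars.lowerChar
    · have := h c (by simpa [PySem.Set.mem_ofList] using hc)
      rw [getD_countMap, getD_countMap] at this
      omega
    · have : (code.map PySem.Chars.lowerChar).count c = 0 := List.count_eq_zero.mpr hc
      rw [this]
      positivity
  · intro h k hk
    rw [getD_countMap, getD_countMap]
    have hk' : k ∈ code.map PySem.Chars.lowerChar := by
      simpa [PySem.Set.mem_ofList] using hk
    have h1 : 1 ≤ (code.map PySem.Chars.lowerChar).count k :=
      List.one_le_count_iff.mpr hk'
    have := h k
    constructor <;> omega

theorem count_lower_cons (ch : Char) (rest : List Char) (c : Char) :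
    ((ch :: rest).map PySem.Chars.lowerChar).count c
      = (rest.map PySem.Chars.lowerChar).count c
        + (if c = PySem.Chars.lowerChar ch then 1 else 0) := by
  rw [List.map_cons, List.count_cons]
  by_cases hc : c = PySem.Chars.lowerChar ch
  · subst hc; simp
  · rw [if_neg hc, if_neg]
    simp only [beq_iff_eq]
    exact fun h => hc h.symm

theorem tryConsume_iff (code : List Char) (d : PySem.Dict Char Int)
    (hd : ∀ c, 0 ≤ d.getD c 0) :
    tryConsume d code = true ↔
      ∀ c, ((code.map PySem.Chars.lowerChar).count c : Int) ≤ d.getD c 0 := by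
  induction code generalizing d with
  | nil => simpa [tryConsume] using hd
  | cons ch rest ih =>
      simp only [tryConsume]
      split_ifs with h
      · simp only [false_iff]
        intro h'
        have hv := h' (PySem.Chars.lowerChar ch)
        rw [count_lower_cons, if_pos rfl] at hv
        push_cast at hv
        omega
      · rw [ih _ (fun c => by
            rw [PySem.Dict.getD_insert]
            split_ifs
            · omega
            · exact hd c)]
        constructor
        · intro h' c
          have := h' c
          rw [PySem.Dict.getD_insert] at this
          rw [count_lower_cons]
          by_cases hc : c = PySem.Chars.lowerChar ch
          · rw [if_pos hc]; rw [if_pos hc] at this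
            subst hc
            push_cast
            omega
          · rw [if_neg hc]; rw [if_neg hc] at this
            push_cast
            omega
        · intro h' c
          have := h' c
          rw [count_lower_cons] at this
          rw [PySem.Dict.getD_insert]
          by_cases hc : c = PySem.Chars.lowerChar ch
          · rw [if_pos hc]; rw [if_pos hc] at this
            subst hc
            push_cast at this
            omega
          · rw [if_neg hc]; rw [if_neg hc] at this
            push_cast at this
            omega

theorem budget_eq (s : List Char) : buildBudget s = getCharactersCountMap s := rfl

theorem budget_nonneg (s : List Char) (c : Char) :
    0 ≤ (getCharactersCountMap s).getD c 0 := by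
  rw [getD_countMap]; positivity

theorem check_agree (code : List Char) (secret : List Char) :
    isPossibleToBuildString code (getCharactersCountMap secret)
      = tryConsume (getCharactersCountMap secret) code := by
  rcases h : tryConsume (getCharactersCountMap secret) code with _ | _
  · rw [← Bool.not_eq_true] at h ⊢
    rw [tryConsume_iff code _ (budget_nonneg secret)] at h
    rw [isPossible_iff]
    intro hc
    exact h (fun c => by have := hc c; rw [getD_countMap]; exact this)
  · rw [tryConsume_iff code _ (budget_nonneg secret)] at h
    rw [isPossible_iff]
    intro c
    have := h c; rw [getD_countMap] at this; exact this

theorem loops_agree (secret : List Char) (codes : List String) :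
    decodeLoopA (getCharactersCountMap secret) codes
      = decodeLoopB (getCharactersCountMap secret) codes := by
  induction codes with
  | nil => rfl
  | cons code rest ih =>
      simp only [decodeLoopA, decodeLoopB, check_agree code.toList secret, ih]

-- ===== VERDICT (by name: the statement is the Claim_ definition above) =====
theorem decode_secret_spec : Claim_equal_decode_secret := by
  intro secret codes _
  unfold Spec_decode_secret decode_secret decode_secret_alt
  rw [budget_eq]
  split_ifs
  · rfl
  · exact loops_agree secret.toList codes
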